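-- pv_equiv track=rewrite | github.com/drsphelps/PartIIProject | svm_train.py | rr_split
-- ===== SOURCE A (Python) =====
-- no_part = 10
--
-- def rr_split(features):
--     partitions = []
--
--     for i in range(0, no_part):
--         partitions.append([])
--
--     for i in range(0, len(features)):
--         partition = i % no_part
--         partitions[partition].append(features[i])
--
--     return partitions
-- ===== SOURCE B (Python) =====
-- no_part = 10
--
-- def rr_split(features):
--     return [list(features[i::no_part]) for i in range(no_part)]
-- ===== Notes on version B (the rewrite author's own statement) =====
-- stated objective: simpler
-- what changed: Replaces the element-by-element scatter (compute i % 10, append to the selected bucket) by ten per-bucket gather passes: a comprehension of strided slices features[i::10] for i in range(10).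
import Mathlib
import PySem

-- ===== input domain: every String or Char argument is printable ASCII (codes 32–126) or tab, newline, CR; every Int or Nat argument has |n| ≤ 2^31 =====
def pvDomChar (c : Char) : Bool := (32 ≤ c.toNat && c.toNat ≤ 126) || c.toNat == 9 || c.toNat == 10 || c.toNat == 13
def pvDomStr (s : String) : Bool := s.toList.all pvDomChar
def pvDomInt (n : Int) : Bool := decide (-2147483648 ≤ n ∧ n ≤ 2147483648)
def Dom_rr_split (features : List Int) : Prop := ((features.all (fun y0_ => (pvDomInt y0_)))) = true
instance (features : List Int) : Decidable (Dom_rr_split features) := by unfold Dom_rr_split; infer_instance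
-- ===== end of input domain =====

-- B builds the same partitions as ten strided-slice gather passes instead of A's scatter loop (objective: simpler).

-- ===== PORT A =====
-- indices i and i % 10 are always in range, so pyGetD/pySetD are exact here
def rr_split (features : List Int) : List (List Int) :=
  let partitions := (PySem.List.pyRange 0 10).foldl (fun ps _ => ps ++ [([] : List Int)]) []
  (PySem.List.pyRange 0 (features.length : Int)).foldl
    (fun ps i =>
      let partition := PySem.Int.mod i 10
      PySem.List.pySetD ps partition
        (PySem.List.pyGetD ps partition [] ++ [PySem.List.pyGetD features i 0]))
    partitions

-- ===== PORT B =====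
def rr_split_alt (features : List Int) : List (List Int) :=
  (PySem.List.pyRange 0 10).map
    (fun i => (PySem.List.slice? features (some i) none 10).getD [])

-- ===== PRECONDITION & SPEC =====
def Spec_rr_split (features : List Int) (out : List (List Int)) : Prop := out = rr_split_alt features
instance (features : List Int) (out : List (List Int)) : Decidable (Spec_rr_split features out) := by unfold Spec_rr_split; infer_instance

-- ===== CLAIM (what is proved, stated in full; the proofs are below) =====
def Claim_equal_rr_split : Prop := ∀ (features : List Int), Dom_rr_split features → Spec_rr_split features (rr_split features)

-- ===== LEMMAS AND PROOFS =====

-- bucket j after processing the first n indices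
theorem pv_filterMap_eq_map {α β : Type} (l : List α) (g : α → Option β) (f : α → β)
    (h : ∀ a ∈ l, g a = some (f a)) : l.filterMap g = l.map f := by
  induction l with
  | nil => rfl
  | cons x t ih =>
    rw [List.filterMap_cons, h x (by simp), List.map_cons, ih (fun a ha => h a (by simp [ha]))]

def pvBkt (xs : List Int) (n j : Nat) : List Int :=
  ((List.range n).filter (fun i => i % 10 = j)).map (fun i => xs.getD i 0)

theorem pv_init_eq :
    (PySem.List.pyRange 0 10).foldl (fun ps _ => ps ++ [([] : List Int)]) [] =
      List.replicate 10 ([] : List Int) := by decide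

theorem pv_set_map_range {α : Type} (k : Nat) (f : Nat → α) (m : Nat) (v : α) :
    ((List.range k).map f).set m v = (List.range k).map (fun j => if j = m then v else f j) := by
  apply List.ext_getElem
  · simp
  · intro i h1 h2
    simp only [List.getElem_set, List.getElem_map, List.getElem_range]
    rcases eq_or_ne i m with h | h
    · simp [h]
    · simp [h, Ne.symm h]

theorem pv_bkt_succ (xs : List Int) (n j : Nat) :
    pvBkt xs (n+1) j = pvBkt xs n j ++ (if n % 10 = j then [xs.getD n 0] else []) := by
  unfold pvBkt
  rw [List.range_succ, List.filter_append, List.map_append]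
  congr 1
  by_cases h : n % 10 = j <;> simp [h]

theorem pv_A_main (xs : List Int) (n : Nat) (hn : n ≤ xs.length) :
    (PySem.List.pyRange 0 (n : Int)).foldl
      (fun ps i =>
        PySem.List.pySetD ps (PySem.Int.mod i 10)
          (PySem.List.pyGetD ps (PySem.Int.mod i 10) [] ++ [PySem.List.pyGetD xs i 0]))
      (List.replicate 10 ([] : List Int)) =
    (List.range 10).map (pvBkt xs n) := by
  induction n with
  | zero =>
    rfl
  | succ n ih =>
    have hle : n ≤ xs.length := by omega
    have hsplit : PySem.List.pyRange 0 ((n + 1 : Nat) : Int) =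
        PySem.List.pyRange 0 (n : Int) ++ [(n : Int)] := by
      rw [PySem.List.pyRange_one_append 0 (n : Int) ((n + 1 : Nat) : Int) (by omega) (by omega)]
      congr 1
      rw [PySem.List.pyRange_one_cons (by omega : (n : Int) < ((n + 1 : Nat) : Int))]
      simp [PySem.List.pyRange]
    rw [hsplit, List.foldl_append, ih hle]
    have hmod : PySem.Int.mod (n : Int) 10 = ((n % 10 : Nat) : Int) := by
      simp only [PySem.Int.mod]
      rw [Int.fmod_eq_emod]; simp
    have hm10 : n % 10 < 10 := by omega
    simp only [List.foldl_cons, List.foldl_nil, hmod, PySem.List.pySetD_natCast,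
      PySem.List.pyGetD_natCast]
    rw [pv_set_map_range]
    apply List.map_congr_left
    intro j hj
    simp only [List.mem_range] at hj
    have hget : (List.map (pvBkt xs n) (List.range 10)).getD (n % 10) [] = pvBkt xs n (n % 10) := by
      rw [List.getD_eq_getElem _ _ (by simp [hm10])]
      simp
    rw [hget, pv_bkt_succ]
    by_cases h : j = n % 10
    · simp [h]
    · have : ¬ (n % 10 = j) := fun hh => h hh.symm
      simp [h, this]

theorem pv_filter_range_mod (n j : Nat) (hj : j < 10) :
    (List.range n).filter (fun i => i % 10 = j) =
      (List.range ((n - j + 9) / 10)).map (fun k => j + 10 * k) := by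
  induction n with
  | zero => simp
  | succ n ih =>
    rw [List.range_succ, List.filter_append]
    by_cases h : n % 10 = j
    · have hc : (n + 1 - j + 9) / 10 = (n - j + 9) / 10 + 1 := by omega
      have hn : j + 10 * ((n - j + 9) / 10) = n := by omega
      rw [hc, List.range_succ, List.map_append, ih]
      simp [h, hn]
    · have hc : (n + 1 - j + 9) / 10 = (n - j + 9) / 10 := by omega
      rw [hc, ih]
      simp [h]

theorem pv_slice_bucket (xs : List Int) (j : Nat) :
    PySem.List.slice? xs (some (j : Int)) none 10 =
      some ((List.range ((xs.length - j + 9) / 10)).map (fun k => xs.getD (j + 10 * k) 0)) := by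
  by_cases hj : j < xs.length
  · have hstart : min (j : Int) (xs.length : Int) = (j : Int) := by omega
    have h0 : ¬ ((j : Int) < 0) := by omega
    have hcnt : (((xs.length : Int) - (j : Int) + 10 - 1) / 10).toNat = (xs.length - j + 9) / 10 := by
      omega
    simp only [PySem.List.slice?, PySem.List.sliceIndices]
    norm_num [hstart]
    simp only [if_neg h0]
    rw [if_pos (by omega : (j : Int) < (xs.length : Int)), hcnt]
    apply pv_filterMap_eq_map
    intro k hk
    simp only [List.mem_range] at hk
    have hlt : j + 10 * k < xs.length := by omega
    have hidx : ((j : Int) + 10 * (k : Int)).toNat = j + 10 * k := by omega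
    rw [hidx, List.getElem?_eq_getElem hlt]
    simp
  · have hstart : min (j : Int) (xs.length : Int) = (xs.length : Int) := by omega
    have hcnt : xs.length - j + 9 < 10 := by omega
    have h0 : ¬ ((j : Int) < 0) := by omega
    simp only [PySem.List.slice?, PySem.List.sliceIndices]
    norm_num [hstart]
    simp only [if_neg h0]
    simp [Nat.div_eq_of_lt hcnt]

-- ===== VERDICT (by name: the statement is the Claim_ definition above) =====
theorem rr_split_spec : Claim_equal_rr_split := by
  intro xs _
  unfold Spec_rr_split rr_split rr_split_alt
  rw [pv_init_eq, pv_A_main xs xs.length le_rfl]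
  have hr : PySem.List.pyRange 0 10 = (List.range 10).map Int.ofNat := by decide
  rw [hr, List.map_map]
  apply List.map_congr_left
  intro j hj
  simp only [List.mem_range] at hj
  simp only [Function.comp_apply]
  rw [show Int.ofNat j = ((j : Nat) : Int) from rfl, pv_slice_bucket xs j]
  unfold pvBkt
  rw [pv_filter_range_mod xs.length j hj, List.map_map]
  rfl
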